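-- pv_equiv track=rewrite | github.com/Lefkowicz/Davidson-CSC-121 | HW8.py | connection_analysis
-- ===== SOURCE A (Python) =====
-- def connection_analysis(dot_prod_matrix, dictionary):
--
--     if dot_prod_matrix == 0:
--         return 0
--
--     if dictionary == 0:
--         return 0
--
--     connected = []
--
--     for i in dot_prod_matrix:
--         connected.append(sum(i))
--
--     most_connected_val = max(connected)
--     most_connected_index = connected.index(most_connected_val)
--     most_connected = dictionary[ most_connected_index +1 ]
--
--     return most_connected
-- ===== SOURCE B (Python) =====
-- def connection_analysis(dot_prod_matrix, dictionary):
--     best_val = None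
--     best_index = 0
--     for i, row in enumerate(dot_prod_matrix):
--         s = sum(row)
--         if best_val is None or s > best_val:
--             best_val = s
--             best_index = i
--     return dictionary[best_index + 1]
-- ===== Notes on version B (the rewrite author's own statement) =====
-- stated objective: simpler
-- what changed: One fused enumerate pass keeps a running best row-sum and its first index (strict > preserves first-occurrence tie-breaking), replacing A's materialised sums list followed by separate max() and .index() scans; the dead '== 0' guards are dropped.
import Mathlib
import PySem

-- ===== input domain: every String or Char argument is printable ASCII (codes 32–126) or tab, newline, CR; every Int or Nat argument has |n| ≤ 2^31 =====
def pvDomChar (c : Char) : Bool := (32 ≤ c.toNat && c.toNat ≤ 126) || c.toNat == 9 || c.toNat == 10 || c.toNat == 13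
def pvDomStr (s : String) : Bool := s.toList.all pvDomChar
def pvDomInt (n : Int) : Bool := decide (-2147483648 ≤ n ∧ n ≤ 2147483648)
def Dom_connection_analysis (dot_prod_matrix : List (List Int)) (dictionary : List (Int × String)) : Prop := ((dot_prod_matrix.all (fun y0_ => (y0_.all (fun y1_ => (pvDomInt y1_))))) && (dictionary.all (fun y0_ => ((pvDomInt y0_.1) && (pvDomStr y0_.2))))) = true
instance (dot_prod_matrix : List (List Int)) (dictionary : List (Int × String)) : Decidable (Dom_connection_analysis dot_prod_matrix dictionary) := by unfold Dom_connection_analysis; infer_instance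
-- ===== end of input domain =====

-- B fuses A's sums-list + max() + .index() pipeline into one running-best pass (objective: simpler).
-- A's '== 0' guards can never fire on list/dict arguments, so they vanish under the type convention.

-- ===== PORT A =====
def connection_analysis (dot_prod_matrix : List (List Int)) (dictionary : List (Int × String)) : String :=
  let connected := dot_prod_matrix.foldl (fun acc i => acc ++ [i.sum]) ([] : List Int)
  match PySem.List.max? connected (fun y => y) with
  | none => ""           -- max([]) raises ValueError: outside Pre_
  | some most_connected_val =>
    match PySem.List.index? connected most_connected_val with
    | none => ""
    | some most_connected_index =>
      ((PySem.Dict.mk dictionary).get? ((most_connected_index : Int) + 1)).getD ""  -- KeyError ⇒ none: outside Pre_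

-- ===== PORT B =====
-- loop body of B's single enumerate pass: state = ((best_val?, best_index), i)
def pvStepB (st : (Option Int × Int) × Int) (row : List Int) : (Option Int × Int) × Int :=
  let s := row.sum
  let i := st.2
  match st.1.1 with
  | none => ((some s, i), i + 1)
  | some bv => (if bv < s then (some s, i) else st.1, i + 1)

def connection_analysis_alt (dot_prod_matrix : List (List Int)) (dictionary : List (Int × String)) : String :=
  let st := dot_prod_matrix.foldl pvStepB ((none, 0), 0)
  ((PySem.Dict.mk dictionary).get? (st.1.2 + 1)).getD ""  -- KeyError ⇒ none: outside Pre_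

-- ===== PRECONDITION & SPEC =====
-- Pre_ = exactly where Python A returns: nonempty matrix (else max() raises ValueError) and the
-- dictionary has the key (first index of a maximal row sum) + 1 (else KeyError).
def Pre_connection_analysis (dot_prod_matrix : List (List Int)) (dictionary : List (Int × String)) : Prop :=
  dot_prod_matrix ≠ [] ∧
  ∀ j : Fin dot_prod_matrix.length,
    ((∀ k : Fin dot_prod_matrix.length, (dot_prod_matrix.get k).sum ≤ (dot_prod_matrix.get j).sum) ∧
     (∀ k : Fin dot_prod_matrix.length, (k : Nat) < (j : Nat) → (dot_prod_matrix.get k).sum < (dot_prod_matrix.get j).sum)) →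
    (((j : Nat) : Int) + 1) ∈ dictionary.map Prod.fst
instance (dot_prod_matrix : List (List Int)) (dictionary : List (Int × String)) : Decidable (Pre_connection_analysis dot_prod_matrix dictionary) := by unfold Pre_connection_analysis; infer_instance

def pvWitness_connection_analysis : List (List Int) × (List (Int × String)) := ([[1]], [(1, "a")])

def Spec_connection_analysis (dot_prod_matrix : List (List Int)) (dictionary : List (Int × String)) (out : String) : Prop := out = connection_analysis_alt dot_prod_matrix dictionary
instance (dot_prod_matrix : List (List Int)) (dictionary : List (Int × String)) (out : String) : Decidable (Spec_connection_analysis dot_prod_matrix dictionary out) := by unfold Spec_connection_analysis; infer_instance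

-- ===== CLAIM (what is proved, stated in full; the proofs are below) =====
def Claim_equal_connection_analysis : Prop := ∀ (dot_prod_matrix : List (List Int)) (dictionary : List (Int × String)), Dom_connection_analysis dot_prod_matrix dictionary → Pre_connection_analysis dot_prod_matrix dictionary → Spec_connection_analysis dot_prod_matrix dictionary (connection_analysis dot_prod_matrix dictionary)

-- ===== LEMMAS AND PROOFS =====

-- reference recursion for B's running-best state (proof helper only)
def pvRun (b bi i : Int) : List Int → Int × Int
  | [] => (b, bi)
  | s :: t => if b < s then pvRun s i (i + 1) t else pvRun b bi (i + 1) t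

lemma pvRun_spec (t : List Int) : ∀ (pre : List Int) (b : Int) (j : Nat),
    PySem.List.index? pre b = some j → (∀ x ∈ pre, x ≤ b) →
    ∃ n : Nat, pvRun b (j : Int) (pre.length : Int) t = (t.foldl max b, (n : Int)) ∧
      PySem.List.index? (pre ++ t) (t.foldl max b) = some n := by
  induction t with
  | nil =>
    intro pre b j hj _
    exact ⟨j, by simp [pvRun], by simpa using hj⟩
  | cons s t ih =>
    intro pre b j hj hle
    by_cases hbs : b < s
    · have hns : s ∉ pre := fun hs => absurd hbs (not_lt.mpr (hle s hs))
      have hj' : PySem.List.index? (pre ++ [s]) s = some pre.length :=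
        PySem.List.index?_append_singleton_self pre s hns
      have hle' : ∀ x ∈ pre ++ [s], x ≤ s := by
        intro x hx
        rcases List.mem_append.mp hx with h | h
        · exact le_of_lt (lt_of_le_of_lt (hle x h) hbs)
        · simp at h; omega
      obtain ⟨n, h1, h2⟩ := ih (pre ++ [s]) s pre.length hj' hle'
      refine ⟨n, ?_, ?_⟩
      · have : max b s = s := max_eq_right (le_of_lt hbs)
        simpa [pvRun, hbs, List.length_append, this] using h1
      · have : max b s = s := max_eq_right (le_of_lt hbs)
        simpa [List.foldl_cons, this, List.append_assoc] using h2
    · have hmem : b ∈ pre := Iff.mp (PySem.List.index?_isSome_iff pre b) (by rw [hj]; rfl)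
      have hj' : PySem.List.index? (pre ++ [s]) b = some j := by
        rw [PySem.List.index?_append_of_mem _ hmem]; exact hj
      have hle' : ∀ x ∈ pre ++ [s], x ≤ b := by
        intro x hx
        rcases List.mem_append.mp hx with h | h
        · exact hle x h
        · simp at h; omega
      obtain ⟨n, h1, h2⟩ := ih (pre ++ [s]) b j hj' hle'
      refine ⟨n, ?_, ?_⟩
      · have : max b s = b := max_eq_left (not_lt.mp hbs)
        simpa [pvRun, hbs, List.length_append, this] using h1
      · have : max b s = b := max_eq_left (not_lt.mp hbs)
        simpa [List.foldl_cons, this, List.append_assoc] using h2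

lemma pvFoldB (rows : List (List Int)) : ∀ (b bi i : Int),
    rows.foldl pvStepB ((some b, bi), i)
      = ((some (pvRun b bi i (rows.map List.sum)).1, (pvRun b bi i (rows.map List.sum)).2),
          i + (rows.length : Int)) := by
  induction rows with
  | nil => intro b bi i; simp [pvRun]
  | cons r rs ih =>
    intro b bi i
    simp only [List.foldl_cons, List.map_cons]
    by_cases h : b < r.sum
    · have hstep : pvStepB ((some b, bi), i) r = ((some r.sum, i), i + 1) := by
        simp [pvStepB, h]
      rw [hstep, ih]
      refine Prod.ext (by simp [pvRun, h]) ?_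
      simp only [List.length_cons]
      push_cast; ring
    · have hstep : pvStepB ((some b, bi), i) r = ((some b, bi), i + 1) := by
        simp [pvStepB, h]
      rw [hstep, ih]
      refine Prod.ext (by simp [pvRun, h]) ?_
      simp only [List.length_cons]
      push_cast; ring

lemma pvA_connected (m : List (List Int)) :
    m.foldl (fun acc i => acc ++ [i.sum]) ([] : List Int) = m.map List.sum := by
  simpa using PySem.List.foldl_append_singleton_eq_map List.sum m []

-- ===== VERDICT (by name: the statement is the Claim_ definition above) =====
theorem connection_analysis_spec : Claim_equal_connection_analysis := by
  intro m d _ hpre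
  obtain ⟨hne, -⟩ := hpre
  obtain ⟨r, rs, rfl⟩ := List.exists_cons_of_ne_nil hne
  obtain ⟨n, h1, h2⟩ := pvRun_spec (rs.map List.sum) [r.sum] r.sum 0
    (PySem.List.index?_cons_self r.sum []) (by intro x hx; simp at hx; omega)
  simp only [List.length_singleton, Nat.cast_one, Nat.cast_zero] at h1
  have hconn : (r :: rs).foldl (fun acc i => acc ++ [i.sum]) ([] : List Int)
      = r.sum :: rs.map List.sum := by simpa using pvA_connected (r :: rs)
  have hmax : PySem.List.max? (r.sum :: rs.map List.sum) (fun y => y)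
      = some ((rs.map List.sum).foldl max r.sum) :=
    PySem.List.max?_id_cons r.sum (rs.map List.sum)
  have h2' : PySem.List.index? (r.sum :: rs.map List.sum) ((rs.map List.sum).foldl max r.sum)
      = some n := by simpa using h2
  have hB0 : pvStepB ((none, 0), 0) r = ((some r.sum, 0), 1) := by simp [pvStepB]
  unfold Spec_connection_analysis connection_analysis connection_analysis_alt
  simp only [List.foldl_cons, hB0, pvFoldB rs r.sum 0 1, hconn, hmax, h2', h1]
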